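-- pv_equiv track=rewrite | github.com/pycodermegax/leo-editor | leo/core/leoTest2.py | function_name
-- ===== SOURCE A (Python) =====
-- def function_name(command_name):
--     """Convert a command name into a test function."""
--     result = []
--     parts = command_name.split('-')
--     for part in parts:
--         s = part.replace('(','').replace(')','')
--         inner_parts = s.split(' ')
--         result.append('_'.join(inner_parts))
--     return '_'.join(result)
-- ===== SOURCE B (Python) =====
-- def function_name(command_name):
--     """Convert a command name into a test function."""
--     out = []
--     for ch in command_name:
--         if ch == '(' or ch == ')':
--             continue
--         out.append('_' if ch == ' ' or ch == '-' else ch)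
--     return ''.join(out)
-- ===== Notes on version B (the rewrite author's own statement) =====
-- stated objective: simpler
-- what changed: Replaced the split-on-'-'/strip-parens/split-on-' '/double-join pipeline by a single left-to-right scan over the characters that drops '(' and ')' and maps ' ' and '-' to '_', building the output list directly.
import Mathlib
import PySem

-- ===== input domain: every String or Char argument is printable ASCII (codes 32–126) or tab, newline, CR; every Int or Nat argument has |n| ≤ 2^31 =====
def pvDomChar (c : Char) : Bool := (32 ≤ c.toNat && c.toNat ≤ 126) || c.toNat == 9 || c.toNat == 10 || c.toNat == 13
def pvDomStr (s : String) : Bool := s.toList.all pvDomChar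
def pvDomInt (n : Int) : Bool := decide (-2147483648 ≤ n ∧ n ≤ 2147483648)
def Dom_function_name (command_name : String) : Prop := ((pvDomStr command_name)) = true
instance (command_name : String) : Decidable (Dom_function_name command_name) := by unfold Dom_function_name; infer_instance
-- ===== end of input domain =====

-- B is a single character scan (drop parens, map ' '/'-' to '_') instead of A's
-- split/replace/split/join pipeline; same O(n) cost, simpler decomposition.

-- ===== PORT A =====
def function_name (command_name : String) : String :=
  let parts := PySem.Chars.splitOn command_name.toList ['-']
  let result := parts.foldl (fun result part =>
    let s := PySem.Chars.replace (PySem.Chars.replace part ['('] []) [')'] []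
    let inner_parts := PySem.Chars.splitOn s [' ']
    result ++ [PySem.Chars.join ['_'] inner_parts]) ([] : List (List Char))
  String.mk (PySem.Chars.join ['_'] result)

-- ===== PORT B =====
def function_name_alt (command_name : String) : String :=
  let out := command_name.toList.foldl
    (fun out ch =>
      if ch == '(' || ch == ')' then out
      else out ++ [if ch == ' ' || ch == '-' then '_' else ch]) ([] : List Char)
  String.mk out

-- ===== PRECONDITION & SPEC =====
def Spec_function_name (command_name : String) (out : String) : Prop := out = function_name_alt command_name
instance (command_name : String) (out : String) : Decidable (Spec_function_name command_name out) := by unfold Spec_function_name; infer_instance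

-- ===== CLAIM (what is proved, stated in full; the proofs are below) =====
def Claim_equal_function_name : Prop := ∀ (command_name : String), Dom_function_name command_name → Spec_function_name command_name (function_name command_name)

-- ===== LEMMAS AND PROOFS =====

-- B's per-character action, as an Option-valued map.
def pvF (c : Char) : Option Char :=
  if c == '(' || c == ')' then none
  else some (if c == ' ' || c == '-' then '_' else c)

-- the characters A's replace calls keep
def pvKeep (c : Char) : Bool := !(c == ')') && !(c == '(')

-- A's per-part transform, after the PySem primitives are rewritten to Mathlib forms
def pvInner (p : List Char) : List Char :=
  List.intercalate ['_'] (List.splitOn ' ' (p.filter pvKeep))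

-- what a single non-'-' character contributes at the front of pvInner
def pvEff (c : Char) : List Char :=
  if c == '(' || c == ')' then [] else if c == ' ' then ['_'] else [c]

-- spec of PySem.Chars.replace.go deleting one character (new = [])
theorem pv_replace_go_filter (d : Char) :
    ∀ (l : List Char) (fuel : Nat) (acc : List Char), l.length ≤ fuel →
      PySem.Chars.replace.go [d] [] fuel l acc = acc.reverse ++ l.filter (fun c => !(c == d)) := by
  intro l
  induction l with
  | nil => intro fuel acc _; cases fuel <;> simp [PySem.Chars.replace.go]
  | cons c t ih =>
    intro fuel acc h
    cases fuel with
    | zero => simp at h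
    | succ f =>
      simp only [PySem.Chars.replace.go]
      by_cases hc : c = d
      · subst hc
        simp only [List.isPrefixOf, BEq.rfl, Bool.true_and, if_pos]
        rw [show PySem.Chars.replace.go [c] [] f (List.drop [c].length (c :: t)) ([].reverse ++ acc)
              = PySem.Chars.replace.go [c] [] f t acc from rfl]
        rw [ih f acc (by simpa using h)]
        simp
      · have : ([d].isPrefixOf (c :: t)) = false := by
          simp [List.isPrefixOf]
          exact fun hdc => (hc hdc.symm).elim
        simp only [this, if_neg, Bool.false_eq_true, not_false_iff]
        rw [ih f (c :: acc) (by simpa using Nat.le_of_succ_le_succ h)]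
        simp [hc]

theorem pv_replace_single (d : Char) (l : List Char) :
    PySem.Chars.replace l [d] [] = l.filter (fun c => !(c == d)) := by
  simp [PySem.Chars.replace, pv_replace_go_filter d l l.length [] (le_refl _)]

-- spec of PySem.Chars.splitOn.go on a single-character separator, in terms of List.splitOn
theorem pv_splitOn_go_spec (d : Char) :
    ∀ (l : List Char) (fuel : Nat) (cur : List Char) (acc : List (List Char)), l.length < fuel →
      PySem.Chars.splitOn.go [d] fuel l cur acc
        = acc.reverse ++ (List.splitOn d l).modifyHead (fun x => cur.reverse ++ x) := by
  intro l
  induction l with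
  | nil =>
    intro fuel cur acc h
    cases fuel with
    | zero => omega
    | succ f => simp [PySem.Chars.splitOn.go, List.splitOn, List.splitOnP_nil]
  | cons c t ih =>
    intro fuel cur acc h
    cases fuel with
    | zero => omega
    | succ f =>
      simp only [PySem.Chars.splitOn.go]
      by_cases hc : c = d
      · subst hc
        simp only [List.isPrefixOf, BEq.rfl, Bool.true_and, if_pos]
        rw [show (List.drop [c].length (c :: t)) = t from rfl]
        rw [ih f [] (cur.reverse :: acc) (by simpa using h)]
        have hid : List.modifyHead (fun x : List Char => [].reverse ++ x) (List.splitOn c t)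
            = List.splitOn c t := by
          rw [show (fun x : List Char => [].reverse ++ x) = id from funext fun x => by simp,
            List.modifyHead_id, id_eq]
        rw [hid]
        simp [List.splitOn, List.splitOnP_cons]
      · have hpre : ([d].isPrefixOf (c :: t)) = false := by
          simp [List.isPrefixOf]
          exact fun hdc => (hc hdc.symm).elim
        simp only [hpre, Bool.false_eq_true, if_neg, not_false_iff]
        rw [ih f (c :: cur) acc (by simpa using Nat.lt_of_succ_lt_succ h)]
        simp only [List.splitOn, List.splitOnP_cons, show ((c == d) = false) by simp [hc]]
        rw [if_neg (by simp), List.modifyHead_modifyHead]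
        refine congrArg _ (congrFun (congrArg _ (funext fun x => ?_)) _)
        simp

theorem pv_splitOn_single (d : Char) (l : List Char) :
    PySem.Chars.splitOn l [d] = List.splitOn d l := by
  rw [PySem.Chars.splitOn, pv_splitOn_go_spec d l (l.length + 1) [] [] (by omega)]
  rw [show (fun x : List Char => List.reverse [] ++ x) = id from funext fun x => by simp,
    List.modifyHead_id, id_eq, List.reverse_nil, List.nil_append]

-- intercalate facts used below
theorem pv_icl_cons_cons (s x y : List Char) (zs : List (List Char)) :
    List.intercalate s (x :: y :: zs) = x ++ s ++ List.intercalate s (y :: zs) := by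
  simp [List.intercalate]

theorem pv_icl_head_append (s a x : List Char) (xs : List (List Char)) :
    List.intercalate s ((a ++ x) :: xs) = a ++ List.intercalate s (x :: xs) := by
  cases xs <;> simp [List.intercalate]

-- one character prepended to a part contributes pvEff at the front of pvInner
theorem pv_inner_cons (c : Char) (p : List Char) :
    pvInner (c :: p) = pvEff c ++ pvInner p := by
  by_cases hpar : (c == '(' || c == ')') = true
  · simp only [pvInner, pvEff, List.filter_cons, hpar, if_pos]
    simp only [show (pvKeep c) = false by simp [pvKeep] at hpar ⊢; rcases hpar with h | h <;> simp [h]]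
    simp
  · have hkeep : pvKeep c = true := by simp [pvKeep]; simp at hpar; exact ⟨hpar.2, hpar.1⟩
    simp only [pvInner, pvEff, List.filter_cons, hkeep, if_pos, hpar, if_neg]
    obtain ⟨w, ws, hw⟩ :=
      List.exists_cons_of_ne_nil (List.splitOnP_ne_nil (· == ' ') ((p.filter pvKeep)))
    by_cases hsp : c = ' '
    · subst hsp
      simp only [List.splitOn, List.splitOnP_cons, BEq.rfl, if_pos, if_true]
      rw [show (List.splitOnP (· == ' ') (p.filter pvKeep)) = w :: ws from hw]
      rw [pv_icl_cons_cons]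
      simp
    · simp only [List.splitOn, List.splitOnP_cons, show ((c == ' ') = false) by simp [hsp]]
      rw [if_neg (by simp), if_neg (by simpa using hsp)]
      rw [show (List.splitOnP (· == ' ') (p.filter pvKeep)) = w :: ws from hw]
      simp only [List.modifyHead]
      rw [show (c :: w) = [c] ++ w from rfl, pv_icl_head_append]
      simp [hsp]

-- main characterisation: A's pipeline over a char list is B's filterMap
theorem pv_main (cs : List Char) :
    List.intercalate ['_'] ((List.splitOn '-' cs).map pvInner) = cs.filterMap pvF := by
  induction cs with
  | nil => decide
  | cons c cs ih =>
    obtain ⟨w, ws, hw⟩ := List.exists_cons_of_ne_nil (List.splitOnP_ne_nil (· == '-') cs)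
    by_cases hc : c = '-'
    · subst hc
      simp only [List.splitOn, List.splitOnP_cons, BEq.rfl, if_pos, if_true]
      rw [hw, List.map_cons]
      rw [show (pvInner []) = [] from rfl]
      rw [List.map_cons, pv_icl_cons_cons, ← List.map_cons]
      rw [← hw]
      rw [show (List.splitOnP (· == '-') cs) = List.splitOn '-' cs from rfl, ih]
      simp [pvF, List.filterMap_cons]
    · simp only [List.splitOn, List.splitOnP_cons, show ((c == '-') = false) by simp [hc]]
      rw [if_neg (by simp), hw]
      simp only [List.modifyHead, List.map_cons]
      rw [pv_inner_cons, pv_icl_head_append, ← List.map_cons]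
      rw [← hw, show (List.splitOnP (· == '-') cs) = List.splitOn '-' cs from rfl, ih]
      rw [List.filterMap_cons]
      by_cases hpar : (c == '(' || c == ')') = true
      · simp [pvEff, pvF, hpar]
      · by_cases hsp : c = ' '
        · subst hsp; simp [pvEff, pvF]
        · simp [pvEff, pvF, hpar, hsp, hc]

-- B's foldl builds exactly the filterMap
theorem pv_foldl_B (l : List Char) :
    ∀ acc : List Char,
      l.foldl (fun out ch =>
        if ch == '(' || ch == ')' then out
        else out ++ [if ch == ' ' || ch == '-' then '_' else ch]) acc
      = acc ++ l.filterMap pvF := by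
  induction l with
  | nil => intro acc; simp
  | cons c t ih =>
    intro acc
    rw [List.foldl_cons, ih, List.filterMap_cons]
    by_cases hpar : (c == '(' || c == ')') = true
    · simp [pvF, hpar]
    · simp [pvF, hpar, List.append_assoc]

-- ===== VERDICT (by name: the statement is the Claim_ definition above) =====
theorem function_name_spec : Claim_equal_function_name := by
  intro cn _
  unfold Spec_function_name function_name function_name_alt
  simp only [PySem.Chars.join]
  rw [pv_foldl_B cn.toList [], List.nil_append]
  rw [pv_splitOn_single '-' cn.toList]
  have hmap : (List.splitOn '-' cn.toList).foldl (fun result part =>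
      result ++ [['_'].intercalate
        (PySem.Chars.splitOn (PySem.Chars.replace (PySem.Chars.replace part ['('] []) [')'] []) [' '])]) []
      = (List.splitOn '-' cn.toList).map pvInner := by
    rw [PySem.List.foldl_append_singleton_eq_map, List.nil_append]
    refine List.map_congr_left fun p _ => ?_
    rw [pv_replace_single, pv_replace_single, pv_splitOn_single]
    simp only [pvInner, List.filter_filter]
    rfl
  rw [hmap, pv_main]
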